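-- pv_equiv track=rewrite | github.com/daizyjohnson/homework_calculator | task 3.py | pilot
-- ===== SOURCE A (Python) =====
-- from itertools import product
--
-- def boeing(pr, acc):
--     for com in pr:
--         if com == "1":
--             acc += 3
--         elif com == "2":
--             acc *= 2
--     return acc
--
-- def pilot(s, f, l):
--     for i in range(1, l + 1):
--         space = ["12"] * l
--         for j in product(*space):
--             pr = "".join(j)
--             result = boeing(pr, s)
--             if result == f:
--                 return pr
--     return None
-- ===== SOURCE B (Python) =====
-- def pilot(s, f, l):
--     # Recursive DFS over length-l operation strings, trying "1" (acc+3)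
--     # before "2" (acc*2); first full-length match is returned.
--     if l <= 0:
--         return None
--
--     def dfs(remaining, prefix, acc):
--         if remaining == 0:
--             return prefix if acc == f else None
--         r = dfs(remaining - 1, prefix + "1", acc + 3)
--         if r is not None:
--             return r
--         return dfs(remaining - 1, prefix + "2", acc * 2)
--
--     return dfs(l, "", s)
-- ===== Notes on version B (the rewrite author's own statement) =====
-- stated objective: alternative
-- what changed: Replaces the repeated itertools.product enumeration (the outer range(1,l+1) loop re-enumerates the identical set of length-l strings) with a single recursive DFS/backtracking helper that carries the running accumulator and returns the first full-length match.
import Mathlib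
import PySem

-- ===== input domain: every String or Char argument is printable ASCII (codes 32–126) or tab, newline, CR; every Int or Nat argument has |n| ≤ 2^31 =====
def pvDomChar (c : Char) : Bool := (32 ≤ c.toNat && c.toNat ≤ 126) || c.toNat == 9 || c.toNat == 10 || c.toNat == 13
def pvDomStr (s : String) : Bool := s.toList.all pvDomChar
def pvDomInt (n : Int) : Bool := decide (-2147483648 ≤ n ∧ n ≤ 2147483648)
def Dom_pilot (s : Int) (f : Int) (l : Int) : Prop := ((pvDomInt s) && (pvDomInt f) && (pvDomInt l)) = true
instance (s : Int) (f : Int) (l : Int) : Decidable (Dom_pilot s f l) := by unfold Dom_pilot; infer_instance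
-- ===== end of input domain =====

-- B replaces A's repeated itertools.product enumeration by a single recursive DFS
-- carrying the running accumulator (objective: alternative decomposition).

-- ===== PORT A =====
-- boeing(pr, acc): fold over the characters of pr
def boeing (pr : String) (acc : Int) : Int :=
  pr.toList.foldl (fun a com => if com = '1' then a + 3 else if com = '2' then a * 2 else a) acc

-- itertools.product(*(["12"] * l)): all length-l tuples over the characters of "12",
-- leftmost position varying slowest (Python's product order)
def prodSpace : Nat → List (List Char)
  | 0 => [[]]
  | n + 1 => ("12".toList).flatMap (fun c => (prodSpace n).map (fun j => c :: j))

-- the inner `for j in product(*space): … return pr` loop: first match or fall through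
def pilotInner (s : Int) (f : Int) (js : List (List Char)) : Option String :=
  match js with
  | [] => none
  | j :: rest =>
    let pr := String.ofList j          -- "".join(j)
    if boeing pr s = f then some pr else pilotInner s f rest

-- the outer `for i in range(1, l + 1)` loop
def pilotOuter (s : Int) (f : Int) (l : Int) (is_ : List Int) : Option String :=
  match is_ with
  | [] => none
  | _ :: rest =>
    match pilotInner s f (prodSpace l.toNat) with   -- ["12"] * l; l ≤ 0 gives []
    | some pr => some pr
    | none => pilotOuter s f l rest

def pilot (s : Int) (f : Int) (l : Int) : Option String :=
  pilotOuter s f l (PySem.List.pyRange 1 (l + 1) 1)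

-- ===== PORT B =====
def dfsB (f : Int) : Nat → String → Int → Option String
  | 0, pre, acc => if acc = f then some pre else none
  | n + 1, pre, acc =>
    match dfsB f n (pre ++ "1") (acc + 3) with
    | some r => some r
    | none => dfsB f n (pre ++ "2") (acc * 2)

def pilot_alt (s : Int) (f : Int) (l : Int) : Option String :=
  if l ≤ 0 then none else dfsB f l.toNat "" s

-- ===== PRECONDITION & SPEC =====
def Spec_pilot (s : Int) (f : Int) (l : Int) (out : Option String) : Prop := out = pilot_alt s f l
instance (s : Int) (f : Int) (l : Int) (out : Option String) : Decidable (Spec_pilot s f l out) := by unfold Spec_pilot; infer_instance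

-- ===== CLAIM (what is proved, stated in full; the proofs are below) =====
def Claim_equal_pilot : Prop := ∀ (s : Int) (f : Int) (l : Int), Dom_pilot s f l → Spec_pilot s f l (pilot s f l)

-- ===== LEMMAS AND PROOFS =====

theorem boeing_cons (c : Char) (j : List Char) (acc : Int) :
    boeing (String.ofList (c :: j)) acc =
      boeing (String.ofList j) (if c = '1' then acc + 3 else if c = '2' then acc * 2 else acc) := by
  simp [boeing]

theorem pilotInner_append (s f : Int) (xs ys : List (List Char)) :
    pilotInner s f (xs ++ ys) =
      match pilotInner s f xs with
      | some pr => some pr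
      | none => pilotInner s f ys := by
  induction xs with
  | nil => simp [pilotInner]
  | cons j rest ih =>
      simp only [List.cons_append, pilotInner]
      split_ifs <;> simp [ih]

theorem pilotInner_map_cons (s f : Int) (c : Char) (js : List (List Char)) :
    pilotInner s f (js.map (fun j => c :: j)) =
      (pilotInner (if c = '1' then s + 3 else if c = '2' then s * 2 else s) f js).map
        (fun pr => String.ofList (c :: pr.toList)) := by
  induction js with
  | nil => simp [pilotInner]
  | cons j rest ih =>
      simp only [List.map_cons, pilotInner, boeing_cons]
      by_cases hb :
          boeing (String.ofList j) (if c = '1' then s + 3 else if c = '2' then s * 2 else s) = f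
      · simp [hb]
      · simp [hb, ih]

theorem ofList_cons_str (c : Char) (p : String) :
    String.ofList (c :: p.toList) = String.ofList [c] ++ p := by
  rw [← List.singleton_append, String.ofList_append, String.ofList_toList]

-- key invariant: the DFS from (pre, acc) scans exactly prodSpace n in order
theorem dfsB_eq_inner (f : Int) (n : Nat) (p : String) (acc : Int) :
    dfsB f n p acc =
      (pilotInner acc f (prodSpace n)).map (fun pr => p ++ pr) := by
  induction n generalizing p acc with
  | zero => simp [dfsB, prodSpace, pilotInner, boeing]
  | succ n ih =>
      have h12 : "12".toList = ['1', '2'] := by decide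
      simp only [prodSpace, h12, List.flatMap_cons, List.flatMap_nil, List.append_nil]
      rw [pilotInner_append, pilotInner_map_cons, pilotInner_map_cons]
      simp only [dfsB, ih]
      norm_num
      have h1s : String.ofList ['1'] = "1" := by decide
      have h2s : String.ofList ['2'] = "2" := by decide
      cases h1 : pilotInner (acc + 3) f (prodSpace n) with
      | some pr =>
          simp [ofList_cons_str, h1s, String.append_assoc]
      | none =>
          simp only [Option.map_none]
          cases h2 : pilotInner (acc * 2) f (prodSpace n) with
          | some pr => simp [h2, ofList_cons_str, h2s, String.append_assoc]
          | none => simp [h2]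

theorem pilotOuter_const (s f l : Int) (is_ : List Int)
    (h : pilotInner s f (prodSpace l.toNat) = none) :
    pilotOuter s f l is_ = none := by
  induction is_ with
  | nil => rfl
  | cons i rest ih => simp [pilotOuter, h, ih]

-- ===== VERDICT (by name: the statement is the Claim_ definition above) =====
theorem pilot_spec : Claim_equal_pilot := by
  intro s f l _
  unfold Spec_pilot pilot pilot_alt
  by_cases hl : l ≤ 0
  · have h0 : (l + 1 - 1).toNat = 0 := by omega
    rw [PySem.List.pyRange_one, h0]
    simp [pilotOuter, hl]
  · have hlist : PySem.List.pyRange 1 (l + 1) 1 = 1 :: (PySem.List.pyRange 2 (l + 1) 1) := by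
      apply PySem.List.pyRange_one_cons; omega
    rw [hlist]
    have hd := dfsB_eq_inner f l.toNat "" s
    simp only [pilotOuter]
    cases h : pilotInner s f (prodSpace l.toNat) with
    | some pr => simp [hl, hd, h]
    | none =>
        rw [pilotOuter_const s f l _ h]
        simp [hl, hd, h]
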